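-- pv_equiv track=rewrite | github.com/h89161575-sys/content-tracker | src/tracker.py | _diff_route_chunks
-- ===== SOURCE A (Python) =====
-- from typing import Any, Dict, List, Optional, Tuple
--
-- def _diff_route_chunks(
--     old_chunks: Dict[str, List[str]],
--     new_chunks: Dict[str, List[str]],
-- ) -> Tuple[List[str], List[str], List[str]]:
--     """
--     Compare per-route chunk mappings between two builds.
--
--     Returns:
--         (changed_routes, new_routes, removed_routes)
--     Where changed_routes are routes whose JS chunks changed (= code changed for that page).
--     """
--     old_routes = set(old_chunks.keys())
--     new_routes_set = set(new_chunks.keys())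
--
--     added = sorted(new_routes_set - old_routes)
--     removed = sorted(old_routes - new_routes_set)
--
--     changed: List[str] = []
--     for route in sorted(old_routes & new_routes_set):
--         # Compare only page-specific chunks (filter out shared chunks)
--         old_page = [c for c in old_chunks[route] if "/pages/" in c]
--         new_page = [c for c in new_chunks[route] if "/pages/" in c]
--         if old_page != new_page:
--             changed.append(route)
--
--     return changed, added, removed
-- ===== SOURCE B (Python) =====
-- def _diff_route_chunks(old_chunks, new_chunks):
--     olds = sorted(old_chunks)
--     news = sorted(new_chunks)
--     changed, added, removed = [], [], []
--     i = j = 0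
--     while i < len(olds) and j < len(news):
--         o, n = olds[i], news[j]
--         if o < n:
--             removed.append(o)
--             i += 1
--         elif n < o:
--             added.append(n)
--             j += 1
--         else:
--             if [c for c in old_chunks[o] if "/pages/" in c] != \
--                [c for c in new_chunks[o] if "/pages/" in c]:
--                 changed.append(o)
--             i += 1
--             j += 1
--     removed.extend(olds[i:])
--     added.extend(news[j:])
--     return changed, added, removed
-- ===== Notes on version B (the rewrite author's own statement) =====
-- stated objective: alternative
-- what changed: Replaces the set algebra of A (two set differences, an intersection, three separate sorts and a changed-loop) by a two-pointer merge of the two sorted key lists that classifies each route into removed/added/changed in one sweep.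
import Mathlib
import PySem

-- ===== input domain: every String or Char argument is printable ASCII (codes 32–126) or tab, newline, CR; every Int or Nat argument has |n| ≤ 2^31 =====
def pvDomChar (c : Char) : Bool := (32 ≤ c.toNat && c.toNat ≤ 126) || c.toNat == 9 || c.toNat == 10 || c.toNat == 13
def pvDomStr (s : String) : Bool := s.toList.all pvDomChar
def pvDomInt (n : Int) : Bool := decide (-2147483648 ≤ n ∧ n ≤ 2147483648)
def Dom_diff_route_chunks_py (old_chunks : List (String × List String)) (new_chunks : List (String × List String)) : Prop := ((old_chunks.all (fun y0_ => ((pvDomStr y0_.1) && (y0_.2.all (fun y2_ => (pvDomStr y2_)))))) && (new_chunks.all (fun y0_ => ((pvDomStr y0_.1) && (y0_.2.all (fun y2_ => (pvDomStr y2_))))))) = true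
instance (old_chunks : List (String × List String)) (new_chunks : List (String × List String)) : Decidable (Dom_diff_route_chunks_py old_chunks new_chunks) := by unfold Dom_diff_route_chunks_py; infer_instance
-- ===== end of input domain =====

-- B replaces A's set algebra by a two-pointer merge of the two sorted key lists (alternative algorithm, same cost); return-value equivalence.
-- ===== PORT A =====
def diff_route_chunks_py (old_chunks : List (String × List String)) (new_chunks : List (String × List String)) : List String × List String × List String :=
  let od := PySem.Dict.ofList old_chunks
  let nd := PySem.Dict.ofList new_chunks
  let old_routes := PySem.Set.ofList (PySem.Dict.keys od)
  let new_routes_set := PySem.Set.ofList (PySem.Dict.keys nd)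
  let added := PySem.List.sorted (PySem.Set.diff new_routes_set old_routes) (fun x => x) false
  let removed := PySem.List.sorted (PySem.Set.diff old_routes new_routes_set) (fun x => x) false
  let changed := (PySem.List.sorted (PySem.Set.inter old_routes new_routes_set) (fun x => x) false).foldl
    (fun acc route =>
      let old_page := (PySem.Dict.getD od route []).filter (fun c => PySem.Str.isIn "/pages/" c)
      let new_page := (PySem.Dict.getD nd route []).filter (fun c => PySem.Str.isIn "/pages/" c)
      if old_page ≠ new_page then acc ++ [route] else acc) []
  (changed, added, removed)

-- ===== PORT B =====
-- the two-pointer while loop of Source B, as recursion over the two remaining sorted suffixes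
def pvMergeB (od nd : PySem.Dict String (List String))
    (changed added removed : List String) :
    List String → List String → List String × List String × List String
  | [], js => (changed, added ++ js, removed)
  | o :: is, [] => (changed, added, removed ++ o :: is)
  | o :: is, n :: js =>
    if o < n then pvMergeB od nd changed added (removed ++ [o]) is (n :: js)
    else if n < o then pvMergeB od nd changed (added ++ [n]) removed (o :: is) js
    else if (PySem.Dict.getD od o []).filter (fun c => PySem.Str.isIn "/pages/" c)
            ≠ (PySem.Dict.getD nd o []).filter (fun c => PySem.Str.isIn "/pages/" c)
         then pvMergeB od nd (changed ++ [o]) added removed is js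
         else pvMergeB od nd changed added removed is js
  termination_by is js => is.length + js.length

def diff_route_chunks_py_alt (old_chunks : List (String × List String)) (new_chunks : List (String × List String)) : List String × List String × List String :=
  let od := PySem.Dict.ofList old_chunks
  let nd := PySem.Dict.ofList new_chunks
  let olds := PySem.List.sorted (PySem.Dict.keys od) (fun x => x) false
  let news := PySem.List.sorted (PySem.Dict.keys nd) (fun x => x) false
  pvMergeB od nd [] [] [] olds news

-- ===== PRECONDITION & SPEC =====
def Spec_diff_route_chunks_py (old_chunks : List (String × List String)) (new_chunks : List (String × List String)) (out : List String × List String × List String) : Prop := out = diff_route_chunks_py_alt old_chunks new_chunks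
instance (old_chunks : List (String × List String)) (new_chunks : List (String × List String)) (out : List String × List String × List String) : Decidable (Spec_diff_route_chunks_py old_chunks new_chunks out) := by unfold Spec_diff_route_chunks_py; infer_instance

-- ===== CLAIM (what is proved, stated in full; the proofs are below) =====
def Claim_equal_diff_route_chunks_py : Prop := ∀ (old_chunks : List (String × List String)) (new_chunks : List (String × List String)), Dom_diff_route_chunks_py old_chunks new_chunks → Spec_diff_route_chunks_py old_chunks new_chunks (diff_route_chunks_py old_chunks new_chunks)

-- ===== LEMMAS AND PROOFS =====

-- page-specific chunks of a route in a dict (proof-side abbreviation)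
def pvPages (d : PySem.Dict String (List String)) (r : String) : List String :=
  (PySem.Dict.getD d r []).filter (fun c => PySem.Str.isIn "/pages/" c)

-- two strictly increasing lists with the same members are equal
theorem pvStrictEq (l₁ l₂ : List String) (h1 : l₁.Pairwise (· < ·))
    (h2 : l₂.Pairwise (· < ·)) (hm : ∀ x, x ∈ l₁ ↔ x ∈ l₂) : l₁ = l₂ := by
  have n1 : l₁.Nodup := h1.imp (fun h => ne_of_lt h)
  have n2 : l₂.Nodup := h2.imp (fun h => ne_of_lt h)
  have hp : l₁.Perm l₂ := (List.perm_ext_iff_of_nodup n1 n2).2 hm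
  exact hp.eq_of_pairwise (fun a b _ _ hab hba => le_antisymm hab hba)
    (h1.imp le_of_lt) (h2.imp le_of_lt)

-- sorting a duplicate-free list (by identity) gives a strictly increasing list
theorem pvSortedLt (xs : List String) (h : xs.Nodup) :
    (PySem.List.sorted xs (fun x => x) false).Pairwise (· < ·) := by
  have hle := PySem.List.sorted_pairwise xs (fun x => x)
  have hnd : (PySem.List.sorted xs (fun x => x) false).Nodup :=
    (PySem.List.sorted_perm xs (fun x => x) false).nodup_iff.mpr h
  exact (hle.and hnd).imp (fun ⟨hab, hne⟩ => lt_of_le_of_ne hab hne)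

-- the head of a strictly increasing list is below (hence not in) a list whose head dominates it
theorem pvNotMemOfLtAll {x : String} {ys : List String}
    (h : ∀ z ∈ ys, x < z) : x ∉ ys := fun hx => lt_irrefl x (h x hx)

-- the merge loop of B computes three filters of the two sorted key lists
theorem pvMergeB_eq (od nd : PySem.Dict String (List String))
    (xs ys c a r : List String) :
    xs.Pairwise (· < ·) → ys.Pairwise (· < ·) →
    pvMergeB od nd c a r xs ys =
      (c ++ xs.filter (fun x => decide (x ∈ ys) && decide (pvPages od x ≠ pvPages nd x)),
       a ++ ys.filter (fun y => !decide (y ∈ xs)),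
       r ++ xs.filter (fun x => !decide (x ∈ ys))) := by
  induction xs generalizing ys c a r with
  | nil =>
    intro _ _
    simp [pvMergeB]
  | cons x is ih =>
    induction ys generalizing c a r with
    | nil =>
      intro _ _
      simp [pvMergeB]
    | cons y js ihy =>
      intro hx hy
      have hx' : is.Pairwise (· < ·) := hx.of_cons
      have hy' : js.Pairwise (· < ·) := hy.of_cons
      have hxlt : ∀ z ∈ is, x < z := fun z hz => List.rel_of_pairwise_cons hx hz
      have hylt : ∀ z ∈ js, y < z := fun z hz => List.rel_of_pairwise_cons hy hz
      rw [pvMergeB]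
      by_cases h1 : x < y
      · rw [if_pos h1, ih (y :: js) c a (r ++ [x]) hx' hy]
        have hconga : (y :: js).filter (fun z => !decide (z ∈ is))
            = (y :: js).filter (fun z => !decide (z ∈ x :: is)) := by
          apply List.filter_congr
          intro z hz
          have hxz : x < z := by
            rcases List.mem_cons.1 hz with hz' | hz'
            · exact hz' ▸ h1
            · exact h1.trans (hylt z hz')
          simp [List.mem_cons, (ne_of_lt hxz).symm]
        rw [hconga]
        simp [List.filter_cons, List.append_assoc]
        refine ⟨fun h => absurd h ?_, ne_of_lt h1, fun hz => lt_irrefl x (h1.trans (hylt x hz))⟩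
        rintro (rfl | hz)
        · exact lt_irrefl x h1
        · exact lt_irrefl x (h1.trans (hylt x hz))
      · rw [if_neg h1]
        by_cases h2 : y < x
        · rw [if_pos h2, ihy c (a ++ [y]) r hx hy']
          have hcongc : (x :: is).filter (fun z => decide (z ∈ js) && decide (pvPages od z ≠ pvPages nd z))
              = (x :: is).filter (fun z => decide (z ∈ y :: js) && decide (pvPages od z ≠ pvPages nd z)) := by
            apply List.filter_congr
            intro z hz
            have hyz : y < z := by
              rcases List.mem_cons.1 hz with hz' | hz'
              · exact hz' ▸ h2
              · exact h2.trans (hxlt z hz')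
            simp [List.mem_cons, (ne_of_lt hyz).symm]
          have hcongr : (x :: is).filter (fun z => !decide (z ∈ js))
              = (x :: is).filter (fun z => !decide (z ∈ y :: js)) := by
            apply List.filter_congr
            intro z hz
            have hyz : y < z := by
              rcases List.mem_cons.1 hz with hz' | hz'
              · exact hz' ▸ h2
              · exact h2.trans (hxlt z hz')
            simp [List.mem_cons, (ne_of_lt hyz).symm]
          rw [hcongc, hcongr]
          simp [List.filter_cons, List.append_assoc]
          exact ⟨ne_of_lt h2, fun hz => lt_irrefl y (h2.trans (hxlt y hz))⟩
        · have hxy : x = y := le_antisymm (le_of_not_gt h2) (le_of_not_gt h1)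
          subst hxy
          have hxnotjs : x ∉ js := pvNotMemOfLtAll hylt
          have hxnotis : x ∉ is := pvNotMemOfLtAll hxlt
          have hcongc : ∀ (p : String → Bool),
              is.filter (fun z => decide (z ∈ js) && p z)
              = is.filter (fun z => decide (z ∈ x :: js) && p z) := by
            intro p
            apply List.filter_congr
            intro z hz
            simp [List.mem_cons, (ne_of_lt (hxlt z hz)).symm]
          have hcongr : is.filter (fun z => !decide (z ∈ js))
              = is.filter (fun z => !decide (z ∈ x :: js)) := by
            apply List.filter_congr
            intro z hz
            simp [List.mem_cons, (ne_of_lt (hxlt z hz)).symm]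
          have hconga : js.filter (fun z => !decide (z ∈ is))
              = js.filter (fun z => !decide (z ∈ x :: is)) := by
            apply List.filter_congr
            intro z hz
            simp [List.mem_cons, (ne_of_lt (hylt z hz)).symm]
          by_cases h3 : (PySem.Dict.getD od x []).filter (fun c => PySem.Str.isIn "/pages/" c)
              ≠ (PySem.Dict.getD nd x []).filter (fun c => PySem.Str.isIn "/pages/" c)
          · rw [if_pos h3, ih js (c ++ [x]) a r hx' hy']
            rw [hcongc (fun z => decide (pvPages od z ≠ pvPages nd z)), hcongr, hconga]
            have h3' : pvPages od x ≠ pvPages nd x := h3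
            simp [h3', List.mem_cons, List.append_assoc, hxnotjs, hxnotis]
          · rw [if_neg h3, ih js c a r hx' hy']
            rw [hcongc (fun z => decide (pvPages od z ≠ pvPages nd z)), hcongr, hconga]
            have h3' : ¬ pvPages od x ≠ pvPages nd x := h3
            simp [h3', List.mem_cons, hxnotjs, hxnotis]

-- ===== VERDICT (by name: the statement is the Claim_ definition above) =====
theorem diff_route_chunks_py_spec : Claim_equal_diff_route_chunks_py := by
  intro oc nc _
  unfold Spec_diff_route_chunks_py
  dsimp only [diff_route_chunks_py, diff_route_chunks_py_alt]
  set od := PySem.Dict.ofList oc with hod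
  set nd := PySem.Dict.ofList nc with hnd
  have hndO : (PySem.Dict.keys od).Nodup := PySem.Dict.nodup_keys_ofList oc
  have hndN : (PySem.Dict.keys nd).Nodup := PySem.Dict.nodup_keys_ofList nc
  have hOlt := pvSortedLt _ hndO
  have hNlt := pvSortedLt _ hndN
  rw [pvMergeB_eq od nd _ _ _ _ _ hOlt hNlt]
  rw [PySem.List.foldl_append_ite_eq_filter
    (p := fun route => (PySem.Dict.getD od route []).filter (fun c => PySem.Str.isIn "/pages/" c)
        ≠ (PySem.Dict.getD nd route []).filter (fun c => PySem.Str.isIn "/pages/" c))]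
  simp only [List.nil_append]
  refine Prod.ext ?_ (Prod.ext ?_ ?_)
  · -- changed
    refine pvStrictEq _ _ ((pvSortedLt _ (PySem.Set.nodup_inter _ _ (PySem.Set.nodup_ofList _))).filter _) (hOlt.filter _) ?_
    intro x
    simp only [List.mem_filter, PySem.List.mem_sorted, PySem.Set.mem_inter, PySem.Set.mem_ofList,
      pvPages, Bool.and_eq_true, decide_eq_true_eq]
    tauto
  · -- added
    refine pvStrictEq _ _ (pvSortedLt _ (PySem.Set.nodup_diff _ _ (PySem.Set.nodup_ofList _))) (hNlt.filter _) ?_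
    intro x
    simp only [List.mem_filter, PySem.List.mem_sorted, PySem.Set.mem_diff, PySem.Set.mem_ofList,
      Bool.not_eq_true', decide_eq_false_iff_not]
  · -- removed
    refine pvStrictEq _ _ (pvSortedLt _ (PySem.Set.nodup_diff _ _ (PySem.Set.nodup_ofList _))) (hOlt.filter _) ?_
    intro x
    simp only [List.mem_filter, PySem.List.mem_sorted, PySem.Set.mem_diff, PySem.Set.mem_ofList,
      Bool.not_eq_true', decide_eq_false_iff_not]
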